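-- pv_equiv track=rewrite | github.com/One-o-Five/Daily-Algorithm | Day31~40/Day_32.py | count_passwords
-- ===== SOURCE A (Python) =====
-- MOD = 1_000_000_007
--
-- def count_passwords(N, M, A, H):
--     # A^i % M의 주기 탐색
--     mod_powers = []
--     current = 1
--     seen = {}
--
--     for i in range(M):
--         if current in seen:
--             break
--         mod_powers.append(current)
--         seen[current] = i
--         current = (current * A) % M
--
--     # 주기 정보
--     cycle_start = seen[current]
--     cycle_length = len(mod_powers) - cycle_start
--
--     # A^i % M 계산
--     def get_mod_power(i):
--         if i < cycle_start:
--             return mod_powers[i]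
--         cycle_index = (i - cycle_start) % cycle_length
--         return mod_powers[cycle_start + cycle_index]
--
--     # 가능한 해시값 계산
--     count = [0] * M
--     count[0] = 1  # 초기값
--
--     for i in range(N):
--         new_count = [0] * M
--         for j in range(M):
--             for k in range(M):
--                 new_hash = (j + k * get_mod_power(i)) % M
--                 new_count[new_hash] = (new_count[new_hash] + count[j]) % MOD
--         count = new_count
--
--     return count[H]
-- ===== SOURCE B (Python) =====
-- MOD = 1_000_000_007
--
-- def count_passwords(N, M, A, H):
--     # One DP step is convolution with the distribution of k*A^i mod M
--     # (k = 0..M-1), which is uniform over the multiples of g = gcd(A^i, M),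
--     # each hit g times: new[t] = g * (sum of count over the class t mod g).
--     # This makes each step O(M) instead of O(M^2), and the power A^i mod M
--     # is carried along directly instead of via cycle detection.
--     count = [0] * M
--     count[0] = 1
--     p = 1 % M
--     for _ in range(N):
--         x, y = p, M          # g = gcd(p, M), Euclid
--         while y:
--             x, y = y, x % y
--         g = x
--         s = [0] * g
--         for j in range(M):
--             s[j % g] = (s[j % g] + count[j]) % MOD
--         count = [(g * s[t % g]) % MOD for t in range(M)]
--         p = (p * A) % M
--     return count[H]
-- ===== Notes on version B (the rewrite author's own statement) =====
-- stated objective: faster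
-- what changed: Each DP step is recognized as convolution with the value distribution of k*A^i mod M, which is uniform over multiples of g=gcd(A^i,M): one step becomes new[t]=g*(sum of count over the class t mod g) (one pass over M slots instead of M passes), and the power A^i mod M is carried along by one multiplication instead of A's cycle-detection table; intended as faster, a timing run measured B 278.9x at the largest size both finished (label unconfirmed: only one input of that size finished for A).
import Mathlib
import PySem

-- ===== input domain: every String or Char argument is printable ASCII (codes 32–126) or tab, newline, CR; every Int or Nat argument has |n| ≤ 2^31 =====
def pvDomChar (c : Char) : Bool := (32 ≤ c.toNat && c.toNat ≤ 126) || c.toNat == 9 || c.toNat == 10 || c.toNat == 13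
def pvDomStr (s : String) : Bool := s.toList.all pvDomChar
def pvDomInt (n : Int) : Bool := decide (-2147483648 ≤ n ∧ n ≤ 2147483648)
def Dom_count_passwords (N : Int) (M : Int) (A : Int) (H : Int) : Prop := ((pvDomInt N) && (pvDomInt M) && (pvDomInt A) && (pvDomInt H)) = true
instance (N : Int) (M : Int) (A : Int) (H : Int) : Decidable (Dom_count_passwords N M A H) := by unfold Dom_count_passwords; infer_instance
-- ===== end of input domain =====

-- B replaces A's inner double loop over (j, k) by the convolution with the
-- distribution of k*A^i mod M (uniform over multiples of g = gcd(A^i, M)),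
-- doing one pass per step, and carries the power A^i mod M along directly
-- instead of A's cycle table; intended as faster (a timing run measured
-- B 278.9x on the largest input on which both finished, label unconfirmed).

def pvMOD : Int := 1000000007

-- ===== PORT A =====
-- A's first loop: for i in range(M): if current in seen: break; append/record; current = current*A % M
def cpLoop (M A : Int) : Nat → Nat → Int → List Int → PySem.Dict Int Int →
    List Int × PySem.Dict Int Int × Int
  | 0, _, cur, mps, seen => (mps, seen, cur)
  | fuel+1, i, cur, mps, seen =>
    if (seen.get? cur).isSome then (mps, seen, cur)
    else cpLoop M A fuel (i+1) (PySem.Int.mod (cur * A) M) (mps ++ [cur]) (seen.insert cur (i : Int))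

-- A's DP step: the nested j,k loops over range(M); p = get_mod_power(i).
-- (The loop indices j,k and the written index new_hash are nonnegative, so Nat
-- indexing with .toNat of the Python-mod result is exact here; the list reads
-- count[j] / mod_powers[...] are in range inside Pre_, so getD is exact there.)
def cpStepA (M p : Int) (count : List Int) : List Int :=
  (List.range M.toNat).foldl (fun nc (j : Nat) =>
    (List.range M.toNat).foldl (fun nc (k : Nat) =>
      let nh := (PySem.Int.mod ((j : Int) + (k : Int) * p) M).toNat
      nc.set nh ((nc.getD nh 0 + count.getD j 0) % pvMOD)) nc)
    (List.replicate M.toNat 0)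

def count_passwords (N : Int) (M : Int) (A : Int) (H : Int) : Int :=
  let r := cpLoop M A M.toNat 0 1 [] PySem.Dict.empty
  match (r.2.1).get? r.2.2 with
  | none => 0      -- Python raises KeyError here (happens only for M ≤ 1); outside Pre_
  | some cs =>
    let cycle_start := cs.toNat    -- cs is a loop index recorded by cpLoop, always ≥ 0
    let cycle_length := r.1.length - cycle_start
    let final := (List.range N.toNat).foldl
      (fun count i =>
        cpStepA M
          (if i < cycle_start then r.1.getD i 0
           else r.1.getD (cycle_start + (i - cycle_start) % cycle_length) 0)
          count)
      ((List.replicate M.toNat 0).set 0 1)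
    (PySem.List.pyGet? final H).getD 0

-- ===== PORT B =====
-- Source B's hand-written Euclid loop 'while y: x, y = y, x % y'; the fuel
-- y.natAbs + 1 strictly bounds the number of iterations (|x % y| < |y|),
-- so this computes exactly what the Python loop computes.
def pvGcdGo : Nat → Int → Int → Int
  | 0, x, _ => x
  | fuel+1, x, y => if y = 0 then x else pvGcdGo fuel y (PySem.Int.mod x y)

def pvGcdLoop (x y : Int) : Int := pvGcdGo (y.natAbs + 1) x y

-- one DP step of B: class sums modulo g = gcd(p, M), then new[t] = g*s[t % g] % MOD
-- (j, t and g are nonnegative in Source B, so Nat % is exact here)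
def cpStepB (M : Int) (count : List Int) (p : Int) : List Int :=
  let g := pvGcdLoop p M
  let s := (List.range M.toNat).foldl (fun s (j : Nat) =>
      s.set (j % g.toNat) ((s.getD (j % g.toNat) 0 + count.getD j 0) % pvMOD))
    (List.replicate g.toNat 0)
  (List.range M.toNat).map (fun t => (g * s.getD (t % g.toNat) 0) % pvMOD)

def count_passwords_alt (N : Int) (M : Int) (A : Int) (H : Int) : Int :=
  let st := (List.range N.toNat).foldl
    (fun (st : List Int × Int) _ => (cpStepB M st.1 st.2, PySem.Int.mod (st.2 * A) M))
    ((List.replicate M.toNat 0).set 0 1, PySem.Int.mod 1 M)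
  (PySem.List.pyGet? st.1 H).getD 0

-- ===== PRECONDITION & SPEC =====
-- Pre_ excludes exactly the inputs where Python A raises: M ≤ 1 (KeyError: the
-- reduced residue never enters the cycle dict) and H outside [-M, M) (IndexError).
def Pre_count_passwords (N : Int) (M : Int) (A : Int) (H : Int) : Prop :=
  2 ≤ M ∧ -M ≤ H ∧ H < M
instance (N : Int) (M : Int) (A : Int) (H : Int) : Decidable (Pre_count_passwords N M A H) := by
  unfold Pre_count_passwords; infer_instance

def pvWitness_count_passwords : Int × Int × Int × Int := (2, 3, 5, 1)

def Spec_count_passwords (N : Int) (M : Int) (A : Int) (H : Int) (out : Int) : Prop :=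
  out = count_passwords_alt N M A H
instance (N : Int) (M : Int) (A : Int) (H : Int) (out : Int) : Decidable (Spec_count_passwords N M A H out) := by
  unfold Spec_count_passwords; infer_instance

-- ===== CLAIM (what is proved, stated in full; the proofs are below) =====
def Claim_equal_count_passwords : Prop := ∀ (N : Int) (M : Int) (A : Int) (H : Int), Dom_count_passwords N M A H → Pre_count_passwords N M A H → Spec_count_passwords N M A H (count_passwords N M A H)

-- ===== LEMMAS AND PROOFS =====

-- the true power sequence A^i % M (with pw 0 = 1, Python's unreduced start)
def pw (M A : Int) : Nat → Int
  | 0 => 1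
  | i+1 => PySem.Int.mod (pw M A i * A) M

lemma pw_bounds (M A : Int) (hM : 2 ≤ M) : ∀ i, 0 ≤ pw M A i ∧ pw M A i < M
  | 0 => by simp [pw]; omega
  | i+1 => ⟨PySem.Int.mod_nonneg _ (by omega), PySem.Int.mod_lt _ (by omega)⟩

-- one "new[t] = (new[t] + a) % MOD" scatter update
def pvUpd (acc : List Int) (ta : Nat × Int) : List Int :=
  acc.set ta.1 ((acc.getD ta.1 0 + ta.2) % pvMOD)

-- total amount routed to slot u
def pvSumU (u : Nat) (L : List (Nat × Int)) : Int :=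
  ((L.filter (fun ta => ta.1 == u)).map (·.2)).sum

lemma pvSumU_nil (u : Nat) : pvSumU u [] = 0 := rfl

lemma pvSumU_cons (u : Nat) (ta : Nat × Int) (L : List (Nat × Int)) :
    pvSumU u (ta :: L) = (if ta.1 = u then ta.2 else 0) + pvSumU u L := by
  by_cases h : ta.1 = u <;> simp [pvSumU, List.filter_cons, h]

lemma pvSumU_append (u : Nat) (L1 L2 : List (Nat × Int)) :
    pvSumU u (L1 ++ L2) = pvSumU u L1 + pvSumU u L2 := by
  simp [pvSumU, List.filter_append]

lemma scatter (L : List (Nat × Int)) : ∀ (acc : List Int) (u : Nat), u < acc.length →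
    acc.getD u 0 % pvMOD = acc.getD u 0 →
    (L.foldl pvUpd acc).getD u 0 = (acc.getD u 0 + pvSumU u L) % pvMOD := by
  induction L with
  | nil => intro acc u hu hred; simpa [pvSumU_nil] using hred.symm
  | cons ta L ih =>
    intro acc u hu hred
    simp only [List.foldl_cons, pvSumU_cons]
    have hlen : (pvUpd acc ta).length = acc.length := by simp [pvUpd]
    by_cases h : ta.1 = u
    · have h1 : (pvUpd acc ta).getD u 0 = (acc.getD u 0 + ta.2) % pvMOD := by
        subst h; simp [pvUpd, List.getD, hu]
      rw [ih (pvUpd acc ta) u (by omega)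
            (by rw [h1, Int.emod_emod_of_dvd _ dvd_rfl]),
          h1, Int.emod_add_emod, if_pos h]
      ring_nf
    · have h1 : (pvUpd acc ta).getD u 0 = acc.getD u 0 := by
        simp [pvUpd, List.getD, List.getElem?_set_ne h]
      rw [ih (pvUpd acc ta) u (by omega) (by rw [h1]; exact hred), h1, if_neg h, zero_add]

lemma pvSumU_map (g : Nat → Nat) (v : Nat → Int) (u : Nat) : ∀ n,
    pvSumU u ((List.range n).map (fun k => (g k, v k)))
      = ∑ k ∈ Finset.range n, if g k = u then v k else 0
  | 0 => rfl
  | n+1 => by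
    rw [List.range_succ, List.map_append, pvSumU_append, pvSumU_map g v u n,
        Finset.sum_range_succ]
    simp [pvSumU_cons, pvSumU_nil]

lemma pvSumU_flatMap (F : Nat → List (Nat × Int)) (u : Nat) : ∀ n,
    pvSumU u ((List.range n).flatMap F) = ∑ j ∈ Finset.range n, pvSumU u (F j)
  | 0 => rfl
  | n+1 => by
    rw [List.range_succ, List.flatMap_append, pvSumU_append, pvSumU_flatMap F u n,
        Finset.sum_range_succ]
    simp [List.flatMap_cons, List.flatMap_nil, pvSumU_append, pvSumU_nil]

-- ===== the counting fact: k*p mod M hits each multiple of gcd(p,M) exactly gcd(p,M) times =====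

lemma sum_block (f : Nat → Nat) (m : Nat) (hm : 0 < m) : ∀ g : Nat,
    (∑ k ∈ Finset.range (g * m), f (k % m)) = g * ∑ r ∈ Finset.range m, f r
  | 0 => by simp
  | g+1 => by
    have e : (g+1) * m = g * m + m := by ring
    have hsplit : (∑ k ∈ Finset.range (g*m + m), f (k % m))
        = (∑ k ∈ Finset.range (g*m), f (k % m)) + ∑ i ∈ Finset.Ico (g*m) (g*m+m), f (i % m) := by
      simp only [Finset.range_eq_Ico]
      rw [← Finset.sum_Ico_consecutive (fun k => f (k % m)) (Nat.zero_le (g*m)) (Nat.le_add_right _ _)]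
    have hcong : (∑ k ∈ Finset.range (g*m + m - g*m), f ((g*m + k) % m))
        = ∑ k ∈ Finset.range m, f k := by
      rw [show g*m + m - g*m = m by omega]
      exact Finset.sum_congr rfl (fun k hk => by
        rw [show g * m + k = m * g + k by ring, Nat.mul_add_mod,
            Nat.mod_eq_of_lt (Finset.mem_range.1 hk)])
    rw [e, hsplit, sum_block f m hm g, Finset.sum_Ico_eq_sum_range, hcong]
    ring

lemma one_hit (p' m d' : Nat) (hm : 0 < m) (hco : Nat.Coprime p' m) (hd : d' < m) :
    (∑ r ∈ Finset.range m, if (r * p') % m = d' then (1:Nat) else 0) = 1 := by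
  have hinj : ∀ r1 ∈ Finset.range m, ∀ r2 ∈ Finset.range m,
      (r1 * p') % m = (r2 * p') % m → r1 = r2 := by
    intro r1 h1 r2 h2 h
    have hmeq : r1 ≡ r2 [MOD m] :=
      Nat.ModEq.cancel_right_of_coprime (by simpa [Nat.Coprime] using hco.symm) h
    have e1 : r1 % m = r2 % m := hmeq
    rw [Nat.mod_eq_of_lt (Finset.mem_range.1 h1), Nat.mod_eq_of_lt (Finset.mem_range.1 h2)] at e1
    exact e1
  obtain ⟨r0, hr0m, hb⟩ := Finset.surj_on_of_inj_on_of_card_le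
    (s := Finset.range m) (t := Finset.range m)
    (fun r _ => (r * p') % m)
    (fun r _ => Finset.mem_range.2 (Nat.mod_lt _ hm))
    (fun r1 r2 h1 h2 h => hinj r1 h1 r2 h2 h)
    le_rfl d' (Finset.mem_range.2 hd)
  have hcong : ∀ r ∈ Finset.range m,
      (if (r * p') % m = d' then (1:Nat) else 0) = if r = r0 then 1 else 0 := by
    intro r hr
    by_cases h : r = r0
    · subst h; rw [if_pos rfl, if_pos hb.symm]
    · rw [if_neg h, if_neg]
      intro hc
      exact h (hinj r hr r0 hr0m (hc.trans hb))
  rw [Finset.sum_congr rfl hcong, Finset.sum_ite_eq' (Finset.range m) r0 (fun _ => 1),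
      if_pos hr0m]

lemma shift_iff (Mn j u x : Nat) (hj : j < Mn) (hu : u < Mn) :
    ((j + x) % Mn = u) ↔ (x % Mn = (u + Mn - j) % Mn) := by
  constructor
  · intro h
    have h1 : (j + x) ≡ u [MOD Mn] := by
      show (j + x) % Mn = u % Mn
      rw [h, Nat.mod_eq_of_lt hu]
    have h2 := h1.add_right (Mn - j)
    have e1 : j + x + (Mn - j) = x + Mn := by omega
    have e2 : u + (Mn - j) = u + Mn - j := by omega
    rw [e1, e2] at h2
    have h3 : (x + Mn) ≡ x [MOD Mn] := Nat.add_mod_right x Mn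
    exact (h3.symm.trans h2 : x ≡ (u + Mn - j) [MOD Mn])
  · intro h
    have h1 : x ≡ (u + Mn - j) [MOD Mn] := h
    have h2 := h1.add_left j
    have e : j + (u + Mn - j) = u + Mn := by omega
    rw [e] at h2
    have h3 : (u + Mn) ≡ u [MOD Mn] := Nat.add_mod_right u Mn
    have h4 : (j + x) % Mn = u % Mn := h2.trans h3
    rw [Nat.mod_eq_of_lt hu] at h4
    exact h4

lemma dvd_shift_iff (Mn j u : Nat) (gn : Nat) (hg : 0 < gn) (hgM : gn ∣ Mn) (hj : j < Mn) :
    (gn ∣ (u + Mn - j) % Mn) ↔ j % gn = u % gn := by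
  obtain ⟨t, ht⟩ := hgM
  have h1 : (u + Mn - j) % Mn % gn = (u + Mn - j) % gn := Nat.mod_mod_of_dvd _ ⟨t, ht⟩
  rw [Nat.dvd_iff_mod_eq_zero, h1, ← Nat.dvd_iff_mod_eq_zero]
  rw [← Nat.modEq_iff_dvd' (by omega)]
  constructor
  · intro h
    have h2 : (u + Mn) ≡ u [MOD gn] := by
      rw [ht, show u + gn * t = u + t * gn by ring]
      exact Nat.add_mul_mod_self_right u t gn
    exact (h.trans h2 : j ≡ u [MOD gn])
  · intro h
    have h2 : u ≡ (u + Mn) [MOD gn] := by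
      rw [ht, show u + gn * t = u + t * gn by ring]
      exact (Nat.add_mul_mod_self_right u t gn).symm
    exact ((h : j ≡ u [MOD gn]).trans h2)

lemma count_step (Mn pn j u : Nat) (hM : 0 < Mn) (hp : pn < Mn) (hj : j < Mn) (hu : u < Mn) :
    (∑ k ∈ Finset.range Mn, if (j + k * pn) % Mn = u then (1:Nat) else 0)
      = if j % Nat.gcd pn Mn = u % Nat.gcd pn Mn then Nat.gcd pn Mn else 0 := by
  set gn := Nat.gcd pn Mn with hgn
  have hg0 : 0 < gn := Nat.gcd_pos_of_pos_right _ hM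
  set d := (u + Mn - j) % Mn with hd
  obtain ⟨p', hp'⟩ : gn ∣ pn := Nat.gcd_dvd_left _ _
  obtain ⟨m', hm'⟩ : gn ∣ Mn := Nat.gcd_dvd_right _ _
  have hm'0 : 0 < m' := by
    rcases Nat.eq_zero_or_pos m' with h | h
    · subst h; omega
    · exact h
  have hco : Nat.Coprime p' m' := by
    have := Nat.coprime_div_gcd_div_gcd (m := pn) (n := Mn) hg0
    rwa [← hgn, hp', hm', Nat.mul_div_cancel_left _ hg0, Nat.mul_div_cancel_left _ hg0] at this
  have hhit : ∀ k, (k * pn) % Mn = gn * ((k * p') % m') := by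
    intro k
    rw [hp', hm', show k * (gn * p') = gn * (k * p') by ring, Nat.mul_mod_mul_left]
  have hcond : ∀ k, ((j + k * pn) % Mn = u) ↔ ((k * pn) % Mn = d) :=
    fun k => shift_iff Mn j u (k * pn) hj hu
  by_cases hdg : gn ∣ d
  · obtain ⟨d', hd'⟩ := hdg
    have hd'lt : d' < m' := by
      have : d < Mn := Nat.mod_lt _ hM
      rw [hd', hm'] at this
      exact Nat.lt_of_mul_lt_mul_left this
    have hcond2 : ∀ k, ((k * pn) % Mn = d) ↔ ((k * p') % m' = d') := by
      intro k
      rw [hhit, hd']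
      exact ⟨fun h => Nat.eq_of_mul_eq_mul_left hg0 h, fun h => by rw [h]⟩
    have hstep : ∀ k ∈ Finset.range Mn,
        (if (j + k * pn) % Mn = u then (1:Nat) else 0)
          = (fun r => if (r * p') % m' = d' then (1:Nat) else 0) (k % m') := by
      intro k _
      simp only
      rw [show ((k % m') * p') % m' = (k * p') % m' from Nat.mod_mul_mod k p' m']
      congr 1
      rw [eq_iff_iff, hcond k, hcond2 k]
    rw [Finset.sum_congr rfl hstep, if_pos ((dvd_shift_iff Mn j u gn hg0 ⟨m', hm'⟩ hj).1 ⟨d', hd'⟩)]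
    have := sum_block (fun r => if (r * p') % m' = d' then (1:Nat) else 0) m' hm'0 gn
    rw [← hm'] at this
    rw [this, one_hit p' m' d' hm'0 hco hd'lt, mul_one]
  · have hz : ∀ k ∈ Finset.range Mn, (if (j + k * pn) % Mn = u then (1:Nat) else 0) = 0 := by
      intro k _
      rw [if_neg]
      intro h
      exact hdg (by rw [← (hcond k).1 h] at hdg ⊢; exact ⟨(k * p') % m', hhit k⟩)
    rw [Finset.sum_congr rfl hz, Finset.sum_const_zero,
        if_neg (fun h => hdg ((dvd_shift_iff Mn j u gn hg0 ⟨m', hm'⟩ hj).2 h))]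

-- ===== gcd loop = Nat.gcd =====

lemma pvGcdGo_eq : ∀ (fuel : Nat) (x y : Int), 0 ≤ x → 0 ≤ y → y.toNat < fuel →
    pvGcdGo fuel x y = (Nat.gcd x.toNat y.toNat : Int)
  | 0, x, y => by omega
  | fuel+1, x, y => by
    intro hx hy hf
    by_cases h : y = 0
    · subst h
      simp [pvGcdGo, Int.toNat_of_nonneg hx]
    · have hy0 : 0 < y := by omega
      have hmn : 0 ≤ PySem.Int.mod x y := PySem.Int.mod_nonneg _ hy0
      have hml : PySem.Int.mod x y < y := PySem.Int.mod_lt _ hy0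
      have hrec : pvGcdGo (fuel+1) x y = pvGcdGo fuel y (PySem.Int.mod x y) := by
        simp [pvGcdGo, h]
      rw [hrec, pvGcdGo_eq fuel y (PySem.Int.mod x y) (by omega) hmn (by omega)]
      have htn : (PySem.Int.mod x y).toNat = x.toNat % y.toNat := by
        rw [PySem.Int.mod_eq_emod_of_pos hy0]
        obtain ⟨a, rfl⟩ := Int.eq_ofNat_of_zero_le hx
        obtain ⟨b, rfl⟩ := Int.eq_ofNat_of_zero_le hy
        rw [← Int.natCast_mod, Int.toNat_natCast, Int.toNat_natCast, Int.toNat_natCast]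
      rw [htn, Nat.gcd_comm y.toNat _, ← Nat.gcd_rec y.toNat x.toNat,
          Nat.gcd_comm y.toNat x.toNat]

lemma pvGcdLoop_eq (x y : Int) (hx : 0 ≤ x) (hy : 0 ≤ y) :
    pvGcdLoop x y = (Nat.gcd x.toNat y.toNat : Int) :=
  pvGcdGo_eq (y.natAbs + 1) x y hx hy (by omega)

-- ===== the step equivalence =====

lemma int_mul_emod_absorb (a b n : Int) : a * (b % n) % n = a * b % n := by
  conv_rhs => rw [Int.mul_emod]
  rw [Int.mul_emod a (b % n) n, Int.emod_emod_of_dvd _ dvd_rfl]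

lemma length_cpStepB (M : Int) (c : List Int) (p : Int) :
    (cpStepB M c p).length = M.toNat := by
  simp [cpStepB]

lemma step_eq (M p : Int) (c : List Int) (hM : 2 ≤ M) (hp0 : 0 ≤ p) (hp1 : p < M)
    (hc : c.length = M.toNat) : cpStepA M p c = cpStepB M c p := by
  have hM0 : 0 < M := by omega
  set Mn := M.toNat with hMn
  have hMni : (Mn : Int) = M := Int.toNat_of_nonneg (by omega)
  have hMn2 : 2 ≤ Mn := by omega
  set pn := p.toNat with hpn
  have hpni : (pn : Int) = p := Int.toNat_of_nonneg hp0
  have hpnlt : pn < Mn := by omega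
  set gn := Nat.gcd pn Mn with hgn
  have hg0 : 0 < gn := Nat.gcd_pos_of_pos_right _ (by omega)
  have hgcd : pvGcdLoop p M = (gn : Int) := by
    rw [pvGcdLoop_eq p M hp0 (by omega)]
  have hgt : (pvGcdLoop p M).toNat = gn := by rw [hgcd]; exact Int.toNat_natCast gn
  -- A's written index, in Nat form
  have htgt : ∀ j k : Nat, (PySem.Int.mod ((j:Int) + (k:Int) * p) M).toNat = (j + k * pn) % Mn := by
    intro j k
    rw [PySem.Int.mod_eq_emod_of_pos hM0, ← hpni, ← hMni,
        show ((j:Int) + (k:Int) * (pn:Int)) = ((j + k * pn : Nat) : Int) by push_cast; ring,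
        ← Int.natCast_mod, Int.toNat_natCast]
  -- A side as a flat scatter over all (j,k) pairs
  have hA : cpStepA M p c
      = ((List.range Mn).flatMap
          (fun j => (List.range Mn).map (fun k => ((j + k * pn) % Mn, c.getD j 0)))).foldl
          pvUpd (List.replicate Mn 0) := by
    rw [List.foldl_flatMap]
    unfold cpStepA
    refine PySem.List.foldl_congr_mem _ _ _ _ ?_
    intro acc j _
    rw [List.foldl_map]
    refine PySem.List.foldl_congr_mem _ _ _ _ ?_
    intro acc2 k _
    simp only [pvUpd, htgt]
  -- B's class-sum list as a flat scatter
  have hB : (List.range Mn).foldl (fun s (j : Nat) =>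
        s.set (j % gn) ((s.getD (j % gn) 0 + c.getD j 0) % pvMOD)) (List.replicate gn 0)
      = ((List.range Mn).map (fun j => (j % gn, c.getD j 0))).foldl pvUpd (List.replicate gn 0) := by
    rw [List.foldl_map]
    rfl
  -- the common mathematical value
  have key : ∀ u, u < Mn →
      (cpStepA M p c).getD u 0 = ((gn : Int) * ((∑ j ∈ Finset.range Mn,
        if j % gn = u % gn then c.getD j 0 else 0) % pvMOD)) % pvMOD := by
    intro u hu
    have hred : (List.replicate Mn (0:Int)).getD u 0 % pvMOD = (List.replicate Mn (0:Int)).getD u 0 := by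
      rw [List.getD_replicate _ hu]; decide
    rw [hA, scatter _ _ u (by simpa using hu) hred, List.getD_replicate _ hu, zero_add]
    rw [pvSumU_flatMap]
    have hinner : ∀ j ∈ Finset.range Mn,
        pvSumU u ((List.range Mn).map (fun k => ((j + k * pn) % Mn, c.getD j 0)))
          = (gn : Int) * (if j % gn = u % gn then c.getD j 0 else 0) := by
      intro j hj
      rw [pvSumU_map]
      have h1 : (∑ k ∈ Finset.range Mn, if (j + k * pn) % Mn = u then c.getD j 0 else 0)
          = (∑ k ∈ Finset.range Mn, if (j + k * pn) % Mn = u then (1:Int) else 0) * c.getD j 0 := by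
        rw [Finset.sum_mul]
        exact Finset.sum_congr rfl (fun k _ => by split <;> simp)
      rw [h1]
      have h2 : (∑ k ∈ Finset.range Mn, if (j + k * pn) % Mn = u then (1:Int) else 0)
          = ((∑ k ∈ Finset.range Mn, if (j + k * pn) % Mn = u then (1:Nat) else 0 : Nat) : Int) := by
        push_cast
        exact Finset.sum_congr rfl (fun k _ => by split <;> simp)
      rw [h2, count_step Mn pn j u (by omega) hpnlt (Finset.mem_range.1 hj) hu]
      by_cases h : j % gn = u % gn
      · rw [if_pos h, if_pos h]
      · rw [if_neg h, if_neg h]; simp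
    rw [Finset.sum_congr rfl hinner, ← Finset.mul_sum, int_mul_emod_absorb]
  -- now compare the two lists elementwise
  have hAB : ∀ u, u < Mn → (cpStepA M p c).getD u 0 = (cpStepB M c p).getD u 0 := by
    intro u hu
    rw [key u hu]
    unfold cpStepB
    simp only [hgcd, Int.toNat_natCast, ← hMn]
    rw [PySem.List.getD_map_range _ _ _ _ hu]
    rw [hB, scatter _ _ (u % gn) (by simpa using Nat.mod_lt u hg0)
          (by rw [List.getD_replicate _ (Nat.mod_lt u hg0)]; decide),
        List.getD_replicate _ (Nat.mod_lt u hg0), zero_add, pvSumU_map]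
  -- lengths
  have hlenA : (cpStepA M p c).length = Mn := by
    rw [hA]
    have : ∀ (L : List (Nat × Int)) (acc : List Int), (L.foldl pvUpd acc).length = acc.length := by
      intro L
      induction L with
      | nil => intro acc; rfl
      | cons ta L ih => intro acc; rw [List.foldl_cons, ih]; simp [pvUpd]
    rw [this]; simp
  have hlenB : (cpStepB M c p).length = Mn := length_cpStepB M c p
  apply List.ext_getElem (by rw [hlenA, hlenB])
  intro u hu1 hu2
  have h1 := hAB u (by omega)
  rwa [List.getD_eq_getElem (cpStepA M p c) 0 (by omega),
       List.getD_eq_getElem (cpStepB M c p) 0 (by omega)] at h1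

-- ===== cycle-detection loop of A =====

lemma cpLoop_spec (M A : Int) : ∀ (fuel i : Nat) (seen : PySem.Dict Int Int),
    (∀ k v, seen.get? k = some v → ∃ j : Nat, v = (j : Int) ∧ j < i ∧ pw M A j = k) →
    (∀ j, j < i → (seen.get? (pw M A j)).isSome) →
    (∀ j1 j2, j1 < j2 → j2 < i → pw M A j1 ≠ pw M A j2) →
    ∃ (i' : Nat) (seen' : PySem.Dict Int Int),
      i ≤ i' ∧ i' ≤ i + fuel ∧
      cpLoop M A fuel i (pw M A i) ((List.range i).map (pw M A)) seen
        = ((List.range i').map (pw M A), seen', pw M A i') ∧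
      (∀ k v, seen'.get? k = some v → ∃ j : Nat, v = (j : Int) ∧ j < i' ∧ pw M A j = k) ∧
      (∀ j, j < i' → (seen'.get? (pw M A j)).isSome) ∧
      (∀ j1 j2, j1 < j2 → j2 < i' → pw M A j1 ≠ pw M A j2) ∧
      ((seen'.get? (pw M A i')).isSome ∨ i' = i + fuel) := by
  intro fuel
  induction fuel with
  | zero =>
    intro i seen h1 h2 h3
    exact ⟨i, seen, le_rfl, by omega, rfl, h1, h2, h3, Or.inr rfl⟩
  | succ f ih =>
    intro i seen h1 h2 h3
    by_cases hs : (seen.get? (pw M A i)).isSome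
    · exact ⟨i, seen, le_rfl, by omega, by simp [cpLoop, hs], h1, h2, h3, Or.inl hs⟩
    · have hstep : cpLoop M A (f+1) i (pw M A i) ((List.range i).map (pw M A)) seen
          = cpLoop M A f (i+1) (pw M A (i+1)) ((List.range (i+1)).map (pw M A))
              (seen.insert (pw M A i) (i : Int)) := by
        rw [show cpLoop M A (f+1) i (pw M A i) ((List.range i).map (pw M A)) seen
              = if (seen.get? (pw M A i)).isSome then ((List.range i).map (pw M A), seen, pw M A i)
                else cpLoop M A f (i+1) (PySem.Int.mod (pw M A i * A) M)
                  ((List.range i).map (pw M A) ++ [pw M A i]) (seen.insert (pw M A i) (i : Int))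
              from rfl,
            if_neg (by simpa using hs)]
        rw [List.range_succ, List.map_append]
        rfl
      have h1' : ∀ k v, (seen.insert (pw M A i) (i : Int)).get? k = some v →
          ∃ j : Nat, v = (j : Int) ∧ j < i + 1 ∧ pw M A j = k := by
        intro k v hkv
        by_cases hk : k = pw M A i
        · subst hk
          rw [PySem.Dict.get?_insert_self] at hkv
          cases hkv
          exact ⟨i, rfl, by omega, rfl⟩
        · rw [PySem.Dict.get?_insert_of_ne _ _ hk] at hkv
          obtain ⟨j, hv, hj, hpw⟩ := h1 k v hkv
          exact ⟨j, hv, by omega, hpw⟩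
      have h2' : ∀ j, j < i + 1 → ((seen.insert (pw M A i) (i : Int)).get? (pw M A j)).isSome := by
        intro j hj
        by_cases hk : pw M A j = pw M A i
        · rw [hk, PySem.Dict.get?_insert_self]; rfl
        · rcases Nat.lt_or_ge j i with h | h
          · rw [PySem.Dict.get?_insert_of_ne _ _ hk]
            exact h2 j h
          · exact absurd (show pw M A j = pw M A i by rw [show j = i by omega]) hk
      have h3' : ∀ j1 j2, j1 < j2 → j2 < i + 1 → pw M A j1 ≠ pw M A j2 := by
        intro j1 j2 hlt hj2
        rcases Nat.lt_or_ge j2 i with h | h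
        · exact h3 j1 j2 hlt h
        · have : j2 = i := by omega
          subst this
          intro hcontra
          have := h2 j1 hlt
          rw [hcontra] at this
          exact absurd this (by simpa using hs)
      obtain ⟨i', seen', hi0, hi1, heq, H1, H2, H3, hd⟩ := ih (i+1) _ h1' h2' h3'
      exact ⟨i', seen', by omega, by omega, hstep.trans heq, H1, H2, H3, by
        rcases hd with h | h
        · exact Or.inl h
        · exact Or.inr (by omega)⟩

-- pigeonhole: among pw 0 .. pw M.toNat there is a repeat
lemma pw_repeat (M A : Int) (hM : 2 ≤ M)
    (hdist : ∀ j1 j2, j1 < j2 → j2 < M.toNat → pw M A j1 ≠ pw M A j2) :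
    ∃ j < M.toNat, pw M A j = pw M A M.toNat := by
  have hcard : (Finset.Ico (0:Int) M).card = M.toNat := by
    rw [Int.card_Ico]; simp
  have hmaps : Set.MapsTo (pw M A) ↑(Finset.range (M.toNat + 1)) ↑(Finset.Ico (0:Int) M) := by
    intro x _
    simp only [Finset.coe_Ico, Set.mem_Ico]
    exact pw_bounds M A hM x
  obtain ⟨a, ha, b, hb, hab, heq⟩ :=
    Finset.exists_ne_map_eq_of_card_lt_of_maps_to
      (by rw [Finset.card_range, hcard]; omega) hmaps
  rw [Finset.mem_range] at ha hb
  rcases Nat.lt_or_ge a b with h | h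
  · rcases Nat.lt_or_ge b M.toNat with h2 | h2
    · exact absurd heq (hdist a b h h2)
    · have : b = M.toNat := by omega
      subst this
      exact ⟨a, by omega, heq⟩
  · have hba : b < a := by omega
    rcases Nat.lt_or_ge a M.toNat with h2 | h2
    · exact absurd heq.symm (hdist b a hba h2)
    · have : a = M.toNat := by omega
      subst this
      exact ⟨b, by omega, heq.symm⟩

-- periodicity of pw from one detected repeat: A's get_mod_power is the true power
lemma pw_period (M A : Int) (j0 L : Nat) (hj0 : j0 < L) (hcyc : pw M A L = pw M A j0) :
    ∀ i, pw M A (if i < j0 then i else j0 + (i - j0) % (L - j0)) = pw M A i := by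
  have hcl : 0 < L - j0 := by omega
  have hper : ∀ x, j0 ≤ x → pw M A (x + (L - j0)) = pw M A x := by
    intro x hx
    induction x, hx using Nat.le_induction with
    | base => rw [show j0 + (L - j0) = L by omega, hcyc]
    | succ x hx ihx =>
      rw [show x + 1 + (L - j0) = (x + (L - j0)) + 1 by omega]
      show PySem.Int.mod (pw M A (x + (L - j0)) * A) M = pw M A (x + 1)
      rw [ihx]
      rfl
  have hmul : ∀ q x, j0 ≤ x → pw M A (x + (L - j0) * q) = pw M A x := by
    intro q
    induction q with
    | zero => intro x _; simp
    | succ q ihq =>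
      intro x hx
      rw [show x + (L - j0) * (q + 1) = (x + (L - j0) * q) + (L - j0) by ring,
          hper _ (by omega), ihq x hx]
  intro i
  by_cases h : i < j0
  · rw [if_pos h]
  · rw [if_neg h]
    have hdm := Nat.div_add_mod (i - j0) (L - j0)
    have hrlt : (i - j0) % (L - j0) < L - j0 := Nat.mod_lt _ hcl
    have he : i = (j0 + (i - j0) % (L - j0)) + (L - j0) * ((i - j0) / (L - j0)) := by omega
    conv_rhs => rw [he]
    rw [hmul ((i - j0) / (L - j0)) _ (by omega)]

-- the main DP fold: A's fold with the true powers vs B's fold carrying the power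
lemma main_fold (M A : Int) (hM : 2 ≤ M) : ∀ n : Nat,
    (List.range n).foldl (fun c i => cpStepA M (pw M A i) c) ((List.replicate M.toNat 0).set 0 1)
      = ((List.range n).foldl
          (fun (st : List Int × Int) _ => (cpStepB M st.1 st.2, PySem.Int.mod (st.2 * A) M))
          ((List.replicate M.toNat 0).set 0 1, PySem.Int.mod 1 M)).1 ∧
    ((List.range n).foldl
        (fun (st : List Int × Int) _ => (cpStepB M st.1 st.2, PySem.Int.mod (st.2 * A) M))
        ((List.replicate M.toNat 0).set 0 1, PySem.Int.mod 1 M)).2 = pw M A n ∧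
    ((List.range n).foldl (fun c i => cpStepA M (pw M A i) c)
        ((List.replicate M.toNat 0).set 0 1)).length = M.toNat := by
  have hm1 : PySem.Int.mod 1 M = 1 := by
    rw [PySem.Int.mod_eq_emod_of_pos (by omega)]
    exact Int.emod_eq_of_lt (by omega) (by omega)
  intro n
  induction n with
  | zero =>
    refine ⟨rfl, ?_, by simp⟩
    simp only [List.range_zero, List.foldl_nil]
    rw [hm1]; rfl
  | succ n ih =>
    obtain ⟨ih1, ih2, ih3⟩ := ih
    simp only [List.range_succ, List.foldl_append, List.foldl_cons, List.foldl_nil]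
    have hb := pw_bounds M A hM n
    have hstep := step_eq M (pw M A n) _ hM hb.1 hb.2 ih3
    refine ⟨?_, ?_, ?_⟩
    · rw [hstep, ih1, ih2]
    · rw [ih2]; rfl
    · rw [hstep, ih1, length_cpStepB]

-- ===== VERDICT (by name: the statement is the Claim_ definition above) =====
theorem count_passwords_spec : Claim_equal_count_passwords := by
  intro N M A H hdom hpre
  obtain ⟨hM, hH1, hH2⟩ := hpre
  unfold Spec_count_passwords count_passwords count_passwords_alt
  obtain ⟨i', seen', hi0, hi1, heq, H1, H2, H3, hd⟩ :=
    cpLoop_spec M A M.toNat 0 PySem.Dict.empty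
      (by intro k v hkv; rw [PySem.Dict.get?_empty] at hkv; cases hkv)
      (by intro j hj; omega)
      (by intro j1 j2 h1 h2; omega)
  have heq' : cpLoop M A M.toNat 0 1 [] PySem.Dict.empty
      = ((List.range i').map (pw M A), seen', pw M A i') := by
    simpa using heq
  have hsome : (seen'.get? (pw M A i')).isSome := by
    rcases hd with h | h
    · exact h
    · have hi' : i' = M.toNat := by omega
      obtain ⟨j, hj, hjeq⟩ := pw_repeat M A hM (by rw [← hi'] at *; exact H3)
      have hj2 := H2 j (by omega)
      rw [hi', ← hjeq]
      exact hj2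
  obtain ⟨cs, hcs⟩ := Option.isSome_iff_exists.1 hsome
  obtain ⟨j0, rfl, hj0lt, hj0eq⟩ := H1 _ _ hcs
  simp only [heq', hcs, Int.toNat_natCast, List.length_map, List.length_range]
  have hfold :
      (List.range N.toNat).foldl
        (fun count i =>
          cpStepA M
            (if i < j0 then ((List.range i').map (pw M A)).getD i 0
             else ((List.range i').map (pw M A)).getD (j0 + (i - j0) % (i' - j0)) 0)
            count)
        ((List.replicate M.toNat 0).set 0 1)
      = (List.range N.toNat).foldl (fun c i => cpStepA M (pw M A i) c)
        ((List.replicate M.toNat 0).set 0 1) := by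
    refine PySem.List.foldl_congr_mem _ _ _ _ ?_
    intro acc i _
    congr 1
    have harg : (if i < j0 then ((List.range i').map (pw M A)).getD i 0
        else ((List.range i').map (pw M A)).getD (j0 + (i - j0) % (i' - j0)) 0)
        = pw M A (if i < j0 then i else j0 + (i - j0) % (i' - j0)) := by
      by_cases h : i < j0
      · rw [if_pos h, if_pos h, PySem.List.getD_map_range _ _ _ _ (by omega)]
      · rw [if_neg h, if_neg h,
            PySem.List.getD_map_range _ _ _ _ (by
              have : (i - j0) % (i' - j0) < i' - j0 := Nat.mod_lt _ (by omega)
              omega)]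
    rw [harg, pw_period M A j0 i' hj0lt (by rw [hj0eq]) i]
  rw [hfold]
  obtain ⟨f1, _, _⟩ := main_fold M A hM N.toNat
  rw [f1]
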